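-- pv_equiv track=rewrite | github.com/panditanvita/MovieBot-aka-Chappie | tokeniser.py | look
-- ===== SOURCE A (Python) =====
-- def levenshtein(s1, s2):
--     if len(s1) < len(s2):
--         return levenshtein(s2, s1)
--
--     # len(s1) >= len(s2)
--     if len(s2) == 0:
--         return len(s1)
--
--     previous_row = range(len(s2) + 1)
--     for i, c1 in enumerate(s1):
--         current_row = [i + 1]
--         for j, c2 in enumerate(s2):
--             insertions = previous_row[j + 1] + 1  # j+1 instead of j since previous_row and current_row are one character longer
--             deletions = current_row[j] + 1       # than s2
--             substitutions = previous_row[j] + (c1 != c2)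
--             current_row.append(min(insertions, deletions, substitutions))
--         previous_row = current_row
--
--     return previous_row[-1]
--
-- def typo(w1, w2, strict=False):
--     w1, w2 = w1.lower(), w2.lower()
--     if w1 == w2: return True
--
--     if strict: return False
--
--     # can't reliably check short words
--     if min(len(w1),len(w2)) <= 3: return False
--
--     # check for typos. other ideas: tying in the concept of
--     # the letters around a letter on the Qwerty keyboard
--
--     # substitution of one letter/ hammond distance
--     if len(w1) == len(w2):
--         s = 0
--         for i, j in zip(w1, w2):
--             if i == j: s += 1
--         if abs(s-len(w1)) <= 1: return True
--
--     # insertion or deletion / levenshtein distance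
--     # for middling words
--     d, m = abs(len(w1)-len(w2)), min(len(w1), len(w2))
--     if d <= 1:
--         if levenshtein(w1, w2) <= 1: return True
--
--     # for larger words, allow greater leeway (2 typos)
--     if d <= 2 and m >= 7:
--         if levenshtein(w1, w2) <= 2: return True
--     # biggest words, allow 3 typos..
--     if d <= 3 and m >= 11:  return levenshtein(w1, w2) <= 3
--     return False
--
-- def recurse(title, tokens):
--     if len(title) == 0:  # win
--         return True
--     if len(tokens) == 0:
--         return False
--     if typo(tokens[0], title[0]):
--         return recurse(title[1:], tokens[1:])
--     else:
--         return False
--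
-- def look(title, tokens, strict=False):
--     # helper function
--     # ignore title tokens like '3d' or '2'
--     def z(t):
--         return not (typo(t, '3d') | typo(t, '2d') | typo(t, '2') | typo(t, '3'))
--
--     title = [t for t in title if z(t)]
--
--     if len(title)==0: return False
--     if len(title) == 1: return sum([typo(title[0],t, strict) for t in tokens])>0
--     if len(tokens) < len(title): return False
--
--     for i, tok in enumerate(tokens[:len(tokens)-len(title)+1]):
--         if typo(tok, title[0], strict):
--             if recurse(title, tokens[i:i+len(title)]):
--                 return True
--             # else, continue checking
--     # if title is more than one word, allow for semi-checks of transient words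
--     # can easily recode it so that it skips some words in the title(like the, at)
--     # if this is useful
--     return False
-- ===== SOURCE B (Python) =====
-- def levenshtein(s1, s2):
--     rows, cols = (s1, s2) if len(s1) >= len(s2) else (s2, s1)
--     if not cols:
--         return len(rows)
--     prev = list(range(len(cols) + 1))
--     for i, c1 in enumerate(rows):
--         cur = [i + 1]
--         for c2, up_left, up in zip(cols, prev, prev[1:]):
--             cur.append(min(up + 1, cur[-1] + 1, up_left + (c1 != c2)))
--         prev = cur
--     return prev[-1]
--
-- def typo(w1, w2, strict=False):
--     a, b = w1.lower(), w2.lower()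
--     if a == b: return True
--     if strict: return False
--     m = min(len(a), len(b))
--     d = abs(len(a) - len(b))
--     if m <= 3: return False
--     # one substitution on equal-length words
--     if len(a) == len(b) and sum(x == y for x, y in zip(a, b)) >= len(a) - 1:
--         return True
--     # longer words earn a larger edit budget
--     limit = 3 if m >= 11 else 2 if m >= 7 else 1
--     return d <= limit and levenshtein(a, b) <= limit
--
-- IGNORED = ('3d', '2d', '2', '3')
--
-- def look(title, tokens, strict=False):
--     title = [t for t in title if not any(typo(t, p) for p in IGNORED)]
--     n = len(title)
--     if n == 0: return False
--     if n == 1: return any(typo(title[0], t, strict) for t in tokens)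
--     if len(tokens) < n: return False
--     # single windowed scan: strict applies only to the first title word
--     return any(all(typo(tokens[i + k], title[k], strict if k == 0 else False)
--                    for k in range(n))
--                for i in range(len(tokens) - n + 1))
-- ===== Notes on version B (the rewrite author's own statement) =====
-- stated objective: simpler
-- what changed: Every layer is restructured: levenshtein drops the recursive argument swap and drives its inner loop by zip(cols, prev, prev[1:]) reading cur[-1] instead of index arithmetic; typo folds A's three-branch if-chain into one edit-budget 'limit' derived from the word length; the title filter iterates a pattern tuple with any(); and the for-loop + recursive helper 'recurse' is replaced by a single windowed any/all scan that applies strict only at window position 0 and avoids building the tokens[i:i+len(title)] slice and re-testing the first word for every candidate window.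
import Mathlib
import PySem

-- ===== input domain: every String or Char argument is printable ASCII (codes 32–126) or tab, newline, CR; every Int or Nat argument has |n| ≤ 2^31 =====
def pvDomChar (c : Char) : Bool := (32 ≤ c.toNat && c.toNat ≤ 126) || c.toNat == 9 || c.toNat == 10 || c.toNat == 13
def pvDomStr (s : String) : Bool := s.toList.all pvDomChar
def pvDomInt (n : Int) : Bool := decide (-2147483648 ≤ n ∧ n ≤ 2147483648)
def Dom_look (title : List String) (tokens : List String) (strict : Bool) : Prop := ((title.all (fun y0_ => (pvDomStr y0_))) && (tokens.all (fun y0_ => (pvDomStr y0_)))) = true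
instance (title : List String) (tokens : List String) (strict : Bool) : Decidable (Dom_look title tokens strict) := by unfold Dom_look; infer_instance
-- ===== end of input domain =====

-- B restructures every layer: a zip-driven levenshtein without the recursive swap, a typo that folds A's if-chain into one edit-budget 'limit', a pattern-list title filter, and a windowed any/all scan replacing the for-loop + recursive helper. Objective: simpler.


-- ===== PORT A =====
-- A's helper: levenshtein(s1, s2), on the char lists
def levenshtein (s1 s2 : List Char) : Int :=
  if _h : s1.length < s2.length then levenshtein s2 s1
  else if s2.length = 0 then (s1.length : Int)
  else
    -- previous_row = range(len(s2)+1)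
    let init : List Int := (List.range (s2.length + 1)).map (fun k => (k : Int))
    let final := (PySem.List.enumerate s1).foldl
      (fun prev p =>
        (PySem.List.enumerate s2).foldl
          (fun cur q =>
            let insertions := prev.getD (q.1.toNat + 1) 0 + 1
            let deletions := cur.getD q.1.toNat 0 + 1
            let substitutions := prev.getD q.1.toNat 0 + (if p.2 ≠ q.2 then (1:Int) else 0)
            cur ++ [min (min insertions deletions) substitutions])
          [p.1 + 1])
      init
    final.getLastD 0    -- previous_row[-1]
termination_by s2.length

-- A's helper: typo(w1, w2, strict)
def typo (w1 w2 : String) (strict : Bool) : Bool :=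
  let a := (PySem.Str.lower w1).toList
  let b := (PySem.Str.lower w2).toList
  if a = b then true
  else if strict then false
  else
    let la : Int := a.length
    let lb : Int := b.length
    if min la lb ≤ 3 then false
    else
      let ham : Bool :=
        if la = lb then
          let s := (List.zip a b).foldl (fun s p => if p.1 = p.2 then s + 1 else s) (0:Int)
          decide (|s - la| ≤ 1)
        else false
      if ham then true
      else
        let d := |la - lb|
        let m := min la lb
        if d ≤ 1 ∧ levenshtein a b ≤ 1 then true
        else if d ≤ 2 ∧ m ≥ 7 ∧ levenshtein a b ≤ 2 then true
        else if d ≤ 3 ∧ m ≥ 11 then decide (levenshtein a b ≤ 3)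
        else false

-- A's helper: look's z(t) title filter (keep t iff z(t))
def keepT (t : String) : Bool :=
  !(typo t "3d" false || typo t "2d" false || typo t "2" false || typo t "3" false)

-- A's helper recurse(title, tokens)
def recurse : List String → List String → Bool
  | [], _ => true
  | _ :: _, [] => false
  | t :: ts, w :: ws => if typo w t false then recurse ts ws else false

-- A's for-loop over enumerate(tokens[:len(tokens)-len(title)+1]) with early return
def lookScan (title tokens : List String) (strict : Bool) : List (Int × String) → Bool
  | [] => false
  | (i, tok) :: rest =>
    if typo tok (title.getD 0 "") strict then
      if recurse title (List.take title.length (List.drop i.toNat tokens)) then true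
      else lookScan title tokens strict rest
    else lookScan title tokens strict rest

def look (title : List String) (tokens : List String) (strict : Bool) : Bool :=
  let title := title.filter keepT
  if title.length = 0 then false
  else if title.length = 1 then
    decide (((tokens.map (fun t => if typo (title.getD 0 "") t strict then (1:Int) else 0)).sum) > 0)
  else if tokens.length < title.length then false
  else lookScan title tokens strict
        (PySem.List.enumerate (List.take (tokens.length - title.length + 1) tokens))

-- ===== PORT B =====
-- B's levenshtein: pick (rows, cols) by one comparison, inner loop drives a zip of
-- (cols, prev, prev[1:]) and reads cur[-1] instead of indexing
def levB (s1 s2 : List Char) : Int :=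
  let rc := if s2.length ≤ s1.length then (s1, s2) else (s2, s1)
  if rc.2 = [] then (rc.1.length : Int)
  else
    let prev0 : List Int := (List.range (rc.2.length + 1)).map (fun k => (k : Int))
    let final := (PySem.List.enumerate rc.1).foldl
      (fun prev p =>
        (List.zip rc.2 (List.zip prev (prev.drop 1))).foldl
          (fun cur t =>
            cur ++ [min (min (t.2.2 + 1) (cur.getLastD 0 + 1))
                        (t.2.1 + (if p.2 ≠ t.1 then (1:Int) else 0))])
          [p.1 + 1])
      prev0
    final.getLastD 0

-- B's typo: equal-length one-substitution test, then a single edit 'limit' from the word length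
def typoB (w1 w2 : String) (strict : Bool) : Bool :=
  let a := (PySem.Str.lower w1).toList
  let b := (PySem.Str.lower w2).toList
  if a = b then true
  else if strict then false
  else
    let m : Int := min (a.length : Int) (b.length : Int)
    let d : Int := |(a.length : Int) - (b.length : Int)|
    if m ≤ 3 then false
    else if a.length = b.length ∧
            (((List.zip a b).countP (fun p => p.1 == p.2) : Int) ≥ (a.length : Int) - 1) then true
    else
      let limit : Int := if m ≥ 11 then 3 else if m ≥ 7 then 2 else 1
      decide (d ≤ limit ∧ levB a b ≤ limit)

-- B's title filter: any over the IGNORED pattern list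
def keepB (t : String) : Bool :=
  !((["3d", "2d", "2", "3"] : List String).any (fun p => typoB t p false))

def look_alt (title : List String) (tokens : List String) (strict : Bool) : Bool :=
  let title := title.filter keepB
  let n := title.length
  if n = 0 then false
  else if n = 1 then tokens.any (fun t => typoB (title.getD 0 "") t strict)
  else if tokens.length < n then false
  else (List.range (tokens.length - n + 1)).any (fun i =>
          (List.range n).all (fun k =>
            typoB (tokens.getD (i + k) "") (title.getD k "") (if k = 0 then strict else false)))

-- ===== PRECONDITION & SPEC =====
def Spec_look (title : List String) (tokens : List String) (strict : Bool) (out : Bool) : Prop := out = look_alt title tokens strict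
instance (title : List String) (tokens : List String) (strict : Bool) (out : Bool) : Decidable (Spec_look title tokens strict out) := by unfold Spec_look; infer_instance

-- ===== CLAIM (what is proved, stated in full; the proofs are below) =====
def Claim_equal_look : Prop := ∀ (title : List String) (tokens : List String) (strict : Bool), Dom_look title tokens strict → Spec_look title tokens strict (look title tokens strict)

-- ===== LEMMAS AND PROOFS =====

-- l.getD (l.length - 1) = l.getLastD  (cur[-1] vs cur[j] when cur has length j+1)
theorem getD_eq_getLastD (l : List Int) (s : ℕ) (h : l.length = s + 1) :
    l.getD s 0 = l.getLastD 0 := by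
  rw [List.getD_eq_getElem?_getD, List.getLastD_eq_getLast?, List.getLast?_eq_getElem?]
  congr 2
  omega

-- A's indexed inner row loop equals B's zip-driven inner row loop
theorem inner_eq (c1 : Char) (prev : List Int) :
    ∀ (cs : List Char) (s : ℕ) (cur : List Int),
      cur.length = s + 1 → s + cs.length < prev.length →
      (PySem.List.enumerate cs (s : Int)).foldl
        (fun cur q =>
          cur ++ [min (min (prev.getD (q.1.toNat + 1) 0 + 1) (cur.getD q.1.toNat 0 + 1))
                      (prev.getD q.1.toNat 0 + (if c1 ≠ q.2 then (1:Int) else 0))]) cur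
      = (List.zip cs (List.zip (prev.drop s) (prev.drop (s + 1)))).foldl
          (fun cur t =>
            cur ++ [min (min (t.2.2 + 1) (cur.getLastD 0 + 1))
                        (t.2.1 + (if c1 ≠ t.1 then (1:Int) else 0))]) cur := by
  intro cs
  induction cs with
  | nil => intro s cur _ _; simp [PySem.List.enumerate_nil]
  | cons c cs ih =>
    intro s cur hcur hlen
    have hs : s < prev.length := by simp at hlen; omega
    have hs1 : s + 1 < prev.length := by simp at hlen; omega
    rw [PySem.List.enumerate_cons, List.foldl_cons]
    rw [List.drop_eq_getElem_cons hs, List.drop_eq_getElem_cons hs1]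
    simp only [List.zip_cons_cons, List.foldl_cons]
    have htn : ((s : Int)).toNat = s := by omega
    rw [htn, getD_eq_getLastD cur s hcur,
        show prev.getD (s + 1) 0 = prev[s + 1] from List.getD_eq_getElem _ _ hs1,
        show prev.getD s 0 = prev[s] from List.getD_eq_getElem _ _ hs,
        show ((s : Int) + 1) = ((s + 1 : ℕ) : Int) by push_cast; ring,
        ih (s + 1) _ (by simp [hcur]) (by simp at hlen ⊢; omega),
        List.drop_eq_getElem_cons hs1,
        show s + 1 + 1 = s + 2 from rfl]

-- each inner loop appends one element per item: row length is preserved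
theorem foldl_length_step {α : Type} (g : List Int → α → List Int)
    (hg : ∀ cur q, (g cur q).length = cur.length + 1) :
    ∀ (l : List α) (init : List Int),
      (List.foldl g init l).length = init.length + l.length := by
  intro l
  induction l with
  | nil => intro init; simp
  | cons x xs ih => intro init; rw [List.foldl_cons, ih, hg]; simp only [List.length_cons]; omega

-- the DP cores agree, row by row
theorem dp_eq (cols : List Char) :
    ∀ (en : List (Int × Char)) (prev : List Int), prev.length = cols.length + 1 →
      en.foldl
        (fun prev p =>
          (PySem.List.enumerate cols).foldl
            (fun cur q =>
              cur ++ [min (min (prev.getD (q.1.toNat + 1) 0 + 1) (cur.getD q.1.toNat 0 + 1))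
                          (prev.getD q.1.toNat 0 + (if p.2 ≠ q.2 then (1:Int) else 0))])
            [p.1 + 1]) prev
      = en.foldl
          (fun prev p =>
            (List.zip cols (List.zip prev (prev.drop 1))).foldl
              (fun cur t =>
                cur ++ [min (min (t.2.2 + 1) (cur.getLastD 0 + 1))
                            (t.2.1 + (if p.2 ≠ t.1 then (1:Int) else 0))])
              [p.1 + 1]) prev := by
  intro en
  induction en with
  | nil => intro prev _; rfl
  | cons p ps ih =>
    intro prev hprev
    simp only [List.foldl_cons]
    have h0 := inner_eq p.2 prev cols 0 [p.1 + 1] (by simp) (by simp [hprev])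
    simp only [Nat.cast_zero, List.drop_zero, Nat.zero_add] at h0
    rw [← h0]
    apply ih
    rw [foldl_length_step _ (by intro cur q; simp)]
    simp only [List.length_singleton, PySem.List.length_enumerate]
    omega

theorem lev_eq (s1 s2 : List Char) : levB s1 s2 = levenshtein s1 s2 := by
  unfold levB levenshtein
  by_cases h : s1.length < s2.length
  · rw [dif_pos h]
    unfold levenshtein
    rw [dif_neg (by omega)]
    simp only [if_neg (by omega : ¬ s2.length ≤ s1.length)]
    by_cases h2 : s1 = []
    · simp [h2]
    · rw [if_neg h2, if_neg (by simp [List.length_eq_zero_iff]; exact h2)]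
      rw [dp_eq s1 (PySem.List.enumerate s2) _ (by simp)]
  · rw [dif_neg h]
    simp only [if_pos (by omega : s2.length ≤ s1.length)]
    by_cases h2 : s2 = []
    · simp [h2]
    · rw [if_neg h2, if_neg (by simp [List.length_eq_zero_iff]; exact h2)]
      rw [dp_eq s2 (PySem.List.enumerate s1) _ (by simp)]

-- A's equal-counting fold is a countP
theorem count_fold (l : List (Char × Char)) :
    ∀ (n : Int), l.foldl (fun s p => if p.1 = p.2 then s + 1 else s) n
      = n + ((l.countP fun p => p.1 == p.2 : ℕ) : Int) := by
  induction l with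
  | nil => intro n; simp
  | cons p ps ih =>
    intro n
    simp only [List.foldl_cons, List.countP_cons, ih]
    by_cases h : p.1 = p.2 <;> simp [h] <;> push_cast <;> ring

theorem typoB_eq (w1 w2 : String) (strict : Bool) : typoB w1 w2 strict = typo w1 w2 strict := by
  unfold typoB typo
  set a := (PySem.Str.lower w1).toList
  set b := (PySem.Str.lower w2).toList
  by_cases hab : a = b
  · simp [hab]
  · rw [if_neg hab, if_neg hab]
    cases strict with
    | true => simp
    | false =>
      simp only [if_neg Bool.false_ne_true, Bool.false_eq_true]
      by_cases hm : min (a.length : Int) (b.length : Int) ≤ 3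
      · simp [hm]
      · rw [if_neg hm, if_neg hm]
        rw [lev_eq a b]
        set lev := levenshtein a b
        have hcount : ((List.zip a b).countP fun p => p.1 == p.2 : ℕ) ≤ (List.zip a b).length :=
          List.countP_le_length
        rw [List.length_zip] at hcount
        set c : ℕ := ((List.zip a b).countP fun p => p.1 == p.2) with hc
        -- A's hamming flag equals B's
        have hham : (if (a.length : Int) = (b.length : Int) then
              decide (|(List.zip a b).foldl (fun s p => if p.1 = p.2 then s + 1 else s) (0:Int)
                       - (a.length : Int)| ≤ 1) else false)
            = decide ((a.length = b.length ∧ ((c : Int) ≥ (a.length : Int) - 1))) := by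
          by_cases hl : a.length = b.length
          · rw [if_pos (by exact_mod_cast hl)]
            rw [count_fold (List.zip a b) 0, zero_add, ← hc]
            simp only [decide_eq_decide, abs_le]
            constructor
            · intro h; exact ⟨hl, by omega⟩
            · intro h; omega
          · rw [if_neg (by exact_mod_cast hl)]
            simp [hl]
        rw [hham]
        by_cases hl2 : (a.length = b.length ∧ ((c : Int) ≥ (a.length : Int) - 1))
        · rw [decide_eq_true hl2, if_pos rfl, if_pos hl2]
        · simp only [hl2, decide_false, Bool.false_eq_true, if_false]
          -- the if-chain versus the single edit budget
          simp only [abs_sub_le_iff]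
          split_ifs
          all_goals first
            | (simp only [decide_eq_decide]; omega)
            | exact decide_eq_true (by omega)
            | exact decide_eq_false (by omega)

theorem keepB_eq (t : String) : keepB t = keepT t := by
  unfold keepB keepT
  simp only [List.any_cons, List.any_nil, typoB_eq, Bool.or_false, Bool.or_assoc]

-- strict typo is only the (lowercased) equality test, so it implies the non-strict one
theorem typo_strict_imp (a b : String) (h : typo a b true = true) : typo a b false = true := by
  unfold typo at h ⊢
  by_cases hc : PySem.Chars.lower a.toList = PySem.Chars.lower b.toList
  · simp [hc]
  · simp [hc] at h

theorem typo_strict_and (w h : String) (strict : Bool) :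
    (typo w h strict && typo w h false) = typo w h strict := by
  cases strict
  · cases typo w h false <;> simp
  · by_cases hs : typo w h true = true
    · simp [hs, typo_strict_imp _ _ hs]
    · simp [Bool.not_eq_true] at hs; simp [hs]

-- recurse on equal-length lists is the pointwise non-strict all
theorem recurse_all (ts ws : List String) (hlen : ws.length = ts.length) :
    recurse ts ws =
      (List.range ts.length).all (fun k => typo (ws.getD k "") (ts.getD k "") false) := by
  induction ts generalizing ws with
  | nil => simp [recurse]
  | cons t ts ih =>
    cases ws with
    | nil => simp at hlen
    | cons w ws =>
      simp only [List.length_cons, Nat.succ_inj] at hlen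
      simp only [recurse, List.length_cons, List.range_succ_eq_map, List.all_cons,
        List.all_map, List.getD_cons_zero, Function.comp_def, List.getD_cons_succ]
      by_cases hw : typo w t false = true
      · simp [hw, ih ws hlen]
      · simp [Bool.not_eq_true] at hw; simp [hw]

-- A's early-return scan is 'any' over the enumerated list
theorem lookScan_any (title tokens : List String) (strict : Bool) (ps : List (Int × String)) :
    lookScan title tokens strict ps =
      ps.any (fun p => typo p.2 (title.getD 0 "") strict &&
        recurse title (List.take title.length (List.drop p.1.toNat tokens))) := by
  induction ps with
  | nil => simp [lookScan]
  | cons p rest ih =>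
    obtain ⟨i, tok⟩ := p
    simp only [lookScan, List.any_cons, ← ih]
    cases h1 : typo tok (title.getD 0 "") strict <;>
      cases h2 : recurse title (List.take title.length (List.drop i.toNat tokens)) <;>
      simp [*]

-- 'any' over enumerate = 'any' over indices
theorem all_congr_mem {α : Type} {l : List α} {f g : α → Bool} (h : ∀ x ∈ l, f x = g x) :
    l.all f = l.all g := by
  simp only [List.all_eq_not_any_not]
  exact congrArg (! ·) (PySem.List.any_congr_mem (fun x hx => by rw [h x hx]))

theorem any_enumerate (l : List String) (f : Int × String → Bool) (s : Int) :
    (PySem.List.enumerate l s).any f =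
      (List.range l.length).any (fun k => f (s + (k : Int), l.getD k "")) := by
  induction l generalizing s with
  | nil => simp [PySem.List.enumerate_nil]
  | cons x xs ih =>
    rw [PySem.List.enumerate_cons, List.any_cons, ih (s + 1)]
    simp only [List.length_cons, List.range_succ_eq_map, List.any_cons, List.any_map,
      Function.comp_def, List.getD_cons_zero, List.getD_cons_succ]
    refine congrArg₂ (· || ·) ?_ (PySem.List.any_congr_mem ?_)
    · norm_num
    · intro k _
      have hk : s + 1 + (k : Int) = s + (((k + 1 : ℕ)) : Int) := by push_cast; ring
      rw [hk]

theorem getD_take_drop (l : List String) (i k n : ℕ) (hk : k < n) (hin : i + n ≤ l.length) :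
    (List.take n (List.drop i l)).getD k "" = l.getD (i + k) "" := by
  have h1 : k < (List.take n (List.drop i l)).length := by
    simp [List.length_take, List.length_drop]; omega
  have h2 : i + k < l.length := by omega
  rw [List.getD_eq_getElem _ _ h1, List.getD_eq_getElem _ _ h2]
  simp [List.getElem_take, List.getElem_drop]

-- the per-window equality: A's (strict head test && recurse on the window) is B's all over the window
theorem window_eq (title tokens : List String) (strict : Bool) (i : ℕ)
    (hn : 1 ≤ title.length) (hin : i + title.length ≤ tokens.length) :
    (typo (tokens.getD i "") (title.getD 0 "") strict &&
      recurse title (List.take title.length (List.drop i tokens))) =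
    (List.range title.length).all (fun k =>
      typo (tokens.getD (i + k) "") (title.getD k "") (if k = 0 then strict else false)) := by
  obtain ⟨hd, rest, rfl⟩ : ∃ hd rest, title = hd :: rest := by
    cases title with
    | nil => simp at hn
    | cons hd rest => exact ⟨hd, rest, rfl⟩
  have hi : i < tokens.length := by simp only [List.length_cons] at hin; omega
  have hw : List.take (hd :: rest).length (List.drop i tokens)
      = tokens.getD i "" :: List.take rest.length (List.drop (i + 1) tokens) := by
    rw [List.getD_eq_getElem _ _ hi, List.length_cons, List.drop_eq_getElem_cons hi,
      List.take_succ_cons]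
  rw [hw]
  have hlen : (List.take rest.length (List.drop (i + 1) tokens)).length = rest.length := by
    simp only [List.length_take, List.length_drop, List.length_cons] at hin ⊢; omega
  simp only [recurse, List.length_cons, List.range_succ_eq_map, List.all_cons, List.all_map,
    Function.comp_def, List.getD_cons_zero, List.getD_cons_succ, Nat.add_zero, Nat.succ_ne_zero]
  have hrec := recurse_all rest (List.take rest.length (List.drop (i + 1) tokens)) hlen
  have hgd : ∀ k ∈ List.range rest.length,
      (typo ((List.take rest.length (List.drop (i + 1) tokens)).getD k "") (rest.getD k "") false)
        = typo (tokens.getD (i + (k + 1)) "") (rest.getD k "") false := by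
    intro k hk
    rw [List.mem_range] at hk
    rw [getD_take_drop tokens (i + 1) k rest.length hk
      (by simp only [List.length_cons] at hin; omega)]
    have : i + 1 + k = i + (k + 1) := by omega
    rw [this]
  rw [hrec, all_congr_mem hgd]
  rw [show (if typo (tokens.getD i "") hd false = true then
        (List.range rest.length).all (fun k => typo (tokens.getD (i + (k + 1)) "") (rest.getD k "") false)
      else false)
    = (typo (tokens.getD i "") hd false &&
        (List.range rest.length).all (fun k => typo (tokens.getD (i + (k + 1)) "") (rest.getD k "") false))
    from by cases typo (tokens.getD i "") hd false <;> simp]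
  rw [← Bool.and_assoc, typo_strict_and]
  simp [Nat.succ_eq_add_one]

-- sum of 0/1 indicators > 0 iff any
theorem sum_pos_iff_any (l : List String) (p : String → Bool) :
    decide (((l.map (fun t => if p t then (1:Int) else 0)).sum) > 0) = l.any p := by
  rw [PySem.List.sum_map_ite_one_zero]
  by_cases h : l.any p = true
  · rw [h]
    rw [List.any_eq_true] at h
    obtain ⟨x, hx, hpx⟩ := h
    have : 0 < l.countP p := by
      rw [List.countP_pos_iff]
      exact ⟨x, hx, hpx⟩
    simp only [decide_eq_true_eq]
    exact_mod_cast this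
  · simp only [Bool.not_eq_true] at h
    rw [h]
    have h2 : l.countP p = 0 := by
      rw [List.countP_eq_zero]
      intro x hx
      rw [List.any_eq_false] at h
      simp [h x hx]
    simp [h2]

theorem look_eq_alt (title tokens : List String) (strict : Bool) :
    look title tokens strict = look_alt title tokens strict := by
  unfold look look_alt
  rw [show typoB = typo from funext fun w1 => funext fun w2 => funext fun s => typoB_eq w1 w2 s,
      show keepB = keepT from funext keepB_eq]
  set T := title.filter keepT with hT
  by_cases h0 : T.length = 0
  · simp [h0]
  · by_cases h1 : T.length = 1
    · simp only [h1]
      exact sum_pos_iff_any tokens (fun t => typo (T.getD 0 "") t strict)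
    · by_cases hlt : tokens.length < T.length
      · simp [h0, h1, hlt]
      · simp only [h0, h1, hlt, if_false]
        have hn1 : 1 ≤ T.length := by omega
        set L := tokens.length - T.length + 1 with hL
        have hLle : L ≤ tokens.length := by omega
        have htl : (List.take L tokens).length = L := by
          simp [List.length_take]; omega
        rw [lookScan_any, any_enumerate _ _ 0, htl]
        apply PySem.List.any_congr_mem
        intro k hk
        rw [List.mem_range] at hk
        have hkn : k + T.length ≤ tokens.length := by omega
        have htn : (0 + (k : Int)).toNat = k := by omega
        rw [htn]
        have hgd : (List.take L tokens).getD k "" = tokens.getD (0 + k) "" :=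
          getD_take_drop tokens 0 k L hk (by omega)
        rw [Nat.zero_add] at hgd
        dsimp only
        rw [hgd]
        exact window_eq T tokens strict k hn1 hkn

-- ===== VERDICT (by name: the statement is the Claim_ definition above) =====
theorem look_spec : Claim_equal_look := by
  intro title tokens strict _
  unfold Spec_look
  exact look_eq_alt title tokens strict
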